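-- pv_equiv track=rewrite | github.com/michaelmech/Pluribass | data_gen.py | _sequence_patterns
-- ===== SOURCE A (Python) =====
-- from typing import List, Tuple, Dict, Any
-- from typing import List, Tuple, Dict, Any
-- from typing import Optional, Tuple, List, Dict
-- from typing import List, Dict
-- from typing import List, Tuple, Dict, Any
-- from typing import List, Tuple, Dict, Any, Optional
-- from typing import Optional, Tuple, List
--
-- def _sequence_patterns(pre_actions_before_hero: List[str]) -> Dict[str, int]:
--     limp_call_before_raise = 0
--     limped = False
--     for a in pre_actions_before_hero:
--         if " cc" in a:
--             limped = True
--         if " cbr" in a and limped: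
--             limp_call_before_raise = 1
--             break
--     return {"limp_call_before_raise": limp_call_before_raise}
-- ===== SOURCE B (Python) =====
-- def _sequence_patterns(pre_actions_before_hero):
--     first_limp = next((i for i, a in enumerate(pre_actions_before_hero) if " cc" in a), None)
--     if first_limp is not None and any(" cbr" in a for a in pre_actions_before_hero[first_limp:]):
--         result = 1
--     else:
--         result = 0
--     return {"limp_call_before_raise": result}
-- ===== Notes on version B (the rewrite author's own statement) =====
-- stated objective: simpler
-- what changed: Replaces A's flag-tracking loop with break by a two-phase decomposition: find the index of the first limp, then scan the inclusive suffix from it for a raise.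
import Mathlib
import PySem

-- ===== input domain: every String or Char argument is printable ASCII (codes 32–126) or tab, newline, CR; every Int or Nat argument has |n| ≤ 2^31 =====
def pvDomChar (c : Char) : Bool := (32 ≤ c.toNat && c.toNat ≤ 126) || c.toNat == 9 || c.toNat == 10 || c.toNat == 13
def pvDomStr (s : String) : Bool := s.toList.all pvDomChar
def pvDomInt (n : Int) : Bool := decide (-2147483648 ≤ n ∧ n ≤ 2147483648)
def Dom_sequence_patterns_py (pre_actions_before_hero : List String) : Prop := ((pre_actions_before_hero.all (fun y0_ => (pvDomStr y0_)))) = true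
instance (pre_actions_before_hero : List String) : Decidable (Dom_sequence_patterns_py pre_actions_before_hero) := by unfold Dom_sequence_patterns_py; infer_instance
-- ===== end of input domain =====

-- ===== PORT A =====
-- B changes A's single flag-tracking loop into find-first-limp + suffix scan (objective: simpler).
-- loop of A: carries the 'limped' flag; 'break' = returning 1 immediately
def pvSeqLoopA : List String → Bool → Int
  | [], _ => 0
  | a :: rest, limped =>
    let limped := if PySem.Str.isIn " cc" a then true else limped
    if PySem.Str.isIn " cbr" a && limped then 1 else pvSeqLoopA rest limped

def sequence_patterns_py (pre_actions_before_hero : List String) : List (String × Int) :=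
  [("limp_call_before_raise", pvSeqLoopA pre_actions_before_hero false)]

-- ===== PORT B =====
def sequence_patterns_py_alt (pre_actions_before_hero : List String) : List (String × Int) :=
  -- next((i for i, a in enumerate(xs) if " cc" in a), None)  →  findIdx?
  match pre_actions_before_hero.findIdx? (fun a => PySem.Str.isIn " cc" a) with
  | none => [("limp_call_before_raise", 0)]
  | some i =>
    -- xs[i:] with the nonnegative index i from findIdx? is xs.drop i
    if (pre_actions_before_hero.drop i).any (fun a => PySem.Str.isIn " cbr" a) then
      [("limp_call_before_raise", 1)]
    else
      [("limp_call_before_raise", 0)]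

-- ===== PRECONDITION & SPEC =====
def Spec_sequence_patterns_py (pre_actions_before_hero : List String) (out : List (String × Int)) : Prop := out = sequence_patterns_py_alt pre_actions_before_hero
instance (pre_actions_before_hero : List String) (out : List (String × Int)) : Decidable (Spec_sequence_patterns_py pre_actions_before_hero out) := by unfold Spec_sequence_patterns_py; infer_instance

-- ===== CLAIM =====
def Claim_equal_sequence_patterns_py : Prop := ∀ (pre_actions_before_hero : List String), Dom_sequence_patterns_py pre_actions_before_hero → Spec_sequence_patterns_py pre_actions_before_hero (sequence_patterns_py pre_actions_before_hero)

-- ===== LEMMAS AND PROOFS =====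
-- After the flag is set, A returns 1 iff some remaining action contains " cbr".
theorem pvSeqLoopA_true (xs : List String) :
    pvSeqLoopA xs true = if xs.any (fun a => PySem.Str.isIn " cbr" a) then 1 else 0 := by
  induction xs with
  | nil => rfl
  | cons a rest ih =>
    simp only [pvSeqLoopA, ite_self, Bool.and_true, List.any_cons]
    by_cases h : PySem.Str.isIn " cbr" a = true
    · simp only [h, Bool.true_or, if_true]
    · rw [Bool.not_eq_true] at h
      simp only [h, Bool.false_or, Bool.false_eq_true, if_false, ih]

theorem pvSeqLoopA_false (xs : List String) :
    pvSeqLoopA xs false =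
      match xs.findIdx? (fun a => PySem.Str.isIn " cc" a) with
      | none => 0
      | some i => if (xs.drop i).any (fun a => PySem.Str.isIn " cbr" a) then 1 else 0 := by
  induction xs with
  | nil => rfl
  | cons a rest ih =>
    by_cases hcc : PySem.Str.isIn " cc" a = true
    · simp only [pvSeqLoopA, hcc, if_true, Bool.and_true, List.findIdx?_cons,
        List.drop_zero, List.any_cons]
      by_cases hbr : PySem.Str.isIn " cbr" a = true
      · simp only [hbr, Bool.true_or, if_true]
      · rw [Bool.not_eq_true] at hbr
        simp only [hbr, Bool.false_or, Bool.false_eq_true, if_false, pvSeqLoopA_true]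
    · rw [Bool.not_eq_true] at hcc
      simp only [pvSeqLoopA, hcc, Bool.false_eq_true, if_false, Bool.and_false,
        List.findIdx?_cons, ih]
      cases rest.findIdx? (fun a => PySem.Str.isIn " cc" a) <;> simp

-- ===== VERDICT =====
theorem sequence_patterns_py_spec : Claim_equal_sequence_patterns_py := by
  intro xs _
  unfold Spec_sequence_patterns_py sequence_patterns_py sequence_patterns_py_alt
  rw [pvSeqLoopA_false]
  cases xs.findIdx? (fun a => PySem.Str.isIn " cc" a)
  · rfl
  · simp only []
    split <;> rfl
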